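-- pv_equiv track=rewrite | github.com/forty9unbeaten/backend-crossword-solver | xword.py | get_matches
-- ===== SOURCE A (Python) =====
-- def get_matches(word_list, user_word):
--     blank_indices = [i for i in range(
--         0, len(user_word)) if user_word[i] == ' ']
--     for word in word_list:
--         if len(word) == len(user_word):
--             split_word = list(word)
--             for i in blank_indices:
--                 split_word[i] = ' '
--             if ''.join(split_word) == user_word:
--                 yield word
-- ===== SOURCE B (Python) =====
-- def get_matches(word_list, user_word):
--     for word in word_list:
--         if len(word) == len(user_word) and all(
--                 uc == ' ' or wc == uc for wc, uc in zip(word, user_word)):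
--             yield word
-- ===== Notes on version B (the rewrite author's own statement) =====
-- stated objective: simpler
-- what changed: Drops the precomputed blank-index table and the per-word list copy/overwrite/join: each word is tested by a single short-circuiting positionwise comparison over zip(word, user_word).
import Mathlib
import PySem

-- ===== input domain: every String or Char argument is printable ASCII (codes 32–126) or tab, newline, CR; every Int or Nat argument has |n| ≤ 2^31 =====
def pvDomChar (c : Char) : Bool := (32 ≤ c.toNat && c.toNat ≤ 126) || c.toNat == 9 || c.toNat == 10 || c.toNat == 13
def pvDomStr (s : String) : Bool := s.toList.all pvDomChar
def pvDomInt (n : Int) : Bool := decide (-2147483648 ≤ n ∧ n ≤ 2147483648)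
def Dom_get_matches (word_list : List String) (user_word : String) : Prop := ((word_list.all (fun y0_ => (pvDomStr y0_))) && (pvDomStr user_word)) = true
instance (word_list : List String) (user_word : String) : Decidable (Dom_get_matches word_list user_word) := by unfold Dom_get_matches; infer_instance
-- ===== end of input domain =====

-- B changes only the matching strategy (direct positionwise test instead of blank-table
-- overwrite + join); equivalence of the return value (the list of yielded words) is proved.

-- ===== PORT A =====
-- literal port: blank_indices, then per word copy chars, overwrite blanks (list
-- assignment via pySetD: exact, indices here are always in range), join and compare
def get_matches (word_list : List String) (user_word : String) : List String :=
  let blank_indices : List Int :=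
    (PySem.List.pyRange 0 (PySem.Str.len user_word) 1).filter
      (fun i => PySem.Str.pyGet? user_word i == some ' ')
  word_list.foldl (fun acc word =>
    if PySem.Str.len word = PySem.Str.len user_word then
      let split_word := word.toList
      let split_word := blank_indices.foldl
        (fun sw i => PySem.List.pySetD sw i ' ') split_word
      if String.ofList split_word = user_word then acc ++ [word] else acc
    else acc) []

-- ===== PORT B =====
def get_matches_alt (word_list : List String) (user_word : String) : List String :=
  word_list.filter (fun word =>
    word.toList.length == user_word.toList.length &&
    (word.toList.zip user_word.toList).all (fun p => p.2 == ' ' || p.1 == p.2))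

-- ===== PRECONDITION & SPEC =====
def Spec_get_matches (word_list : List String) (user_word : String) (out : List String) : Prop := out = get_matches_alt word_list user_word
instance (word_list : List String) (user_word : String) (out : List String) : Decidable (Spec_get_matches word_list user_word out) := by unfold Spec_get_matches; infer_instance

-- ===== CLAIM (what is proved, stated in full; the proofs are below) =====
def Claim_equal_get_matches : Prop := ∀ (word_list : List String) (user_word : String), Dom_get_matches word_list user_word → Spec_get_matches word_list user_word (get_matches word_list user_word)

-- ===== LEMMAS AND PROOFS =====

-- the blank-overwrite fold, characterised elementwise (indices as Nats)
theorem foldl_set_getElem? (js : List Nat) (w : List Char) (j : Nat) :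
    (js.foldl (fun sw k => sw.set k ' ') w)[j]? =
      if j ∈ js ∧ j < w.length then some ' ' else w[j]? := by
  induction js generalizing w with
  | nil => simp
  | cons k js ih =>
    simp only [List.foldl_cons, ih, List.length_set, List.getElem?_set, List.mem_cons]
    by_cases hk : k = j <;> by_cases hj : j ∈ js <;> by_cases hl : j < w.length <;>
      simp [hk, hj, hl, eq_comm] <;> (intro hh; exact absurd hh.symm hk)

theorem zip_all_iff (w u : List Char) (h : w.length = u.length) :
    ((w.zip u).all (fun p => p.2 == ' ' || p.1 == p.2)) = true ↔
      ∀ j (hj : j < u.length), u[j] = ' ' ∨ w[j] = u[j] := by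
  rw [List.all_eq_true]
  constructor
  · intro H j hj
    have := H ((w.zip u)[j]'(by simp [List.length_zip, h, hj]))
      (List.getElem_mem _)
    simp only [List.getElem_zip] at this
    rcases Bool.or_eq_true_iff.mp this with h1 | h1
    · exact Or.inl (by simpa using h1)
    · exact Or.inr (by simpa using h1)
  · intro H p hp
    obtain ⟨j, hj, rfl⟩ := List.mem_iff_getElem.mp hp
    have hj' : j < u.length := by simp [List.length_zip, h] at hj; omega
    simp only [List.getElem_zip]
    rcases H j hj' with h1 | h1 <;> simp [h1]

-- per-word matching condition, on the list side
theorem accept_list (w u : List Char) (h : w.length = u.length) :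
    ((((List.range u.length).filter (fun k => u[k]? == some ' ')).foldl
        (fun sw k => sw.set k ' ') w) = u) ↔
      ((w.zip u).all (fun p => p.2 == ' ' || p.1 == p.2)) = true := by
  have hmem : ∀ j : Nat,
      (j ∈ (List.range u.length).filter (fun k => u[k]? == some ' ')) ↔
        j < u.length ∧ u[j]? = some ' ' := by
    intro j; simp [List.mem_filter, List.mem_range]
  constructor
  · intro hA
    rw [zip_all_iff w u h]
    intro j hj
    have := congrArg (fun l => l[j]?) hA
    simp only at this
    rw [foldl_set_getElem?] at this; simp only [hmem] at this
    by_cases hb : u[j]? = some ' '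
    · left
      have h2 : u[j]? = some u[j] := List.getElem?_eq_getElem hj
      rw [h2] at hb; exact Option.some.inj hb
    · simp only [hj, hb, and_true, true_and, false_and, if_false] at this
      right
      have h1 : w[j]? = some w[j] := List.getElem?_eq_getElem (by omega)
      have h2 : u[j]? = some u[j] := List.getElem?_eq_getElem hj
      rw [h1, h2] at this; exact Option.some.inj this
  · intro hB
    rw [zip_all_iff w u h] at hB
    apply List.ext_getElem?
    intro j
    rw [foldl_set_getElem?]; simp only [hmem]
    by_cases hj : j < u.length
    · by_cases hb : u[j]? = some ' '
      · have h2 : u[j]? = some u[j] := List.getElem?_eq_getElem hj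
        rw [h2] at hb
        have hc : u[j] = ' ' := Option.some.inj hb
        simp [hj, hb, h, hc]
      · simp only [hb, and_false, false_and, if_false]
        rcases hB j hj with h1 | h1
        · exact absurd (by rw [List.getElem?_eq_getElem hj, h1]) hb
        · rw [List.getElem?_eq_getElem (show j < w.length by omega),
            List.getElem?_eq_getElem hj, h1]
    · have hj1 : w[j]? = none := List.getElem?_eq_none (by omega)
      have hj2 : u[j]? = none := List.getElem?_eq_none (by omega)
      simp [hj, hj1, hj2]

theorem pyRange_zero_natCast_map (n : Nat) :
    PySem.List.pyRange 0 (n : Int) 1 = (List.range n).map Int.ofNat := by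
  rw [PySem.List.pyRange_one]
  simp only [Int.sub_zero, Int.toNat_natCast]
  exact List.map_congr_left (fun k _ => by simp)

-- per-word: A's accept condition equals B's accept condition (string level)
theorem accept_iff (word user_word : String) :
    ((PySem.Str.len word = PySem.Str.len user_word) ∧
      String.ofList
        (((PySem.List.pyRange 0 (PySem.Str.len user_word) 1).filter
            (fun i => PySem.Str.pyGet? user_word i == some ' ')).foldl
          (fun sw i => PySem.List.pySetD sw i ' ') word.toList) = user_word) ↔
    (word.toList.length == user_word.toList.length &&
      (word.toList.zip user_word.toList).all
        (fun p => p.2 == ' ' || p.1 == p.2)) = true := by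
  have hlen : (PySem.Str.len word = PySem.Str.len user_word) ↔
      word.toList.length = user_word.toList.length := by
    simp [PySem.Str.len_eq]
  rw [Bool.and_eq_true, beq_iff_eq]
  by_cases h : word.toList.length = user_word.toList.length
  · have hn : PySem.Str.len user_word = ((user_word.toList.length : Nat) : Int) := by
      simp [PySem.Str.len_eq]
    rw [hn, pyRange_zero_natCast_map, List.filter_map, List.foldl_map]
    have hpred : (List.range user_word.toList.length).filter
          ((fun i => PySem.Str.pyGet? user_word i == some ' ') ∘ Int.ofNat)
        = (List.range user_word.toList.length).filter
          (fun k => user_word.toList[k]? == some ' ') := by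
      apply List.filter_congr
      intro k _
      simp [PySem.Str.pyGet?_eq]
    rw [hpred]
    have hset :
        (fun (sw : List Char) (k : Nat) => PySem.List.pySetD sw (Int.ofNat k) ' ')
          = (fun (sw : List Char) (k : Nat) => sw.set k ' ') := by
      funext sw k
      simpa using PySem.List.pySetD_natCast sw k ' '
    rw [hset]
    have hofl : ∀ l : List Char, String.ofList l = user_word ↔ l = user_word.toList := by
      intro l
      constructor
      · intro hh; rw [← hh]; simp
      · intro hh; rw [hh]; simp
    have hlen' : (PySem.Str.len word = ((user_word.toList.length : Nat) : Int)) ↔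
        word.toList.length = user_word.toList.length := by
      simp [PySem.Str.len_eq]
    rw [hofl, hlen', accept_list word.toList user_word.toList h]
  · rw [hlen]
    have h' : ¬ word.length = user_word.length := by simpa using h
    simp [h, h']

-- the outer generator loop, with a generalized accumulator
theorem outer_fold (user_word : String) (ws : List String) (acc : List String) :
    ws.foldl (fun acc word =>
      if PySem.Str.len word = PySem.Str.len user_word then
        let split_word := word.toList
        let split_word := ((PySem.List.pyRange 0 (PySem.Str.len user_word) 1).filter
            (fun i => PySem.Str.pyGet? user_word i == some ' ')).foldl
          (fun sw i => PySem.List.pySetD sw i ' ') split_word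
        if String.ofList split_word = user_word then acc ++ [word] else acc
      else acc) acc
    = acc ++ ws.filter (fun word =>
        word.toList.length == user_word.toList.length &&
        (word.toList.zip user_word.toList).all (fun p => p.2 == ' ' || p.1 == p.2)) := by
  induction ws generalizing acc with
  | nil => simp
  | cons word ws ih =>
    simp only [List.foldl_cons, List.filter_cons]
    by_cases hb : (word.toList.length == user_word.toList.length &&
        (word.toList.zip user_word.toList).all
          (fun p => p.2 == ' ' || p.1 == p.2)) = true
    · have hA := (accept_iff word user_word).mpr hb
      simp only [hA.1, if_true, hA.2, hb, ih, List.append_assoc, List.singleton_append]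
    · have hA := (accept_iff word user_word).not.mpr hb
      by_cases h1 : PySem.Str.len word = PySem.Str.len user_word
      · have h2 : ¬ (String.ofList
            (((PySem.List.pyRange 0 (PySem.Str.len user_word) 1).filter
                (fun i => PySem.Str.pyGet? user_word i == some ' ')).foldl
              (fun sw i => PySem.List.pySetD sw i ' ') word.toList) = user_word) := by
          intro h2; exact hA ⟨h1, h2⟩
        simp only [h1, if_true, h2, if_false, hb, Bool.false_eq_true, ih]
      · simp only [h1, if_false, hb, Bool.false_eq_true, ih]

-- ===== VERDICT (by name: the statement is the Claim_ definition above) =====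
theorem get_matches_spec : Claim_equal_get_matches := by
  intro word_list user_word _
  show get_matches word_list user_word = get_matches_alt word_list user_word
  unfold get_matches get_matches_alt
  simpa using outer_fold user_word word_list []
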